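-- pv_equiv track=rewrite | github.com/Thyristor/retos-programacion-2023 | Retos/Reto #9 - HETEROGRAMA, ISOGRAMA Y PANGRAMA [Fácil]/python/thyristor.py | es_heterograma
-- ===== SOURCE A (Python) =====
-- def es_heterograma(cadena):
--     """
--     Verifica si la cadena es un heterograma, es decir, si no contiene caracteres repetidos.
--     """
--     caracteres_vistos = set()
--
--     for caracter in cadena:
--         if caracter.isalpha():
--             if caracter.lower() in caracteres_vistos:
--                 return False
--             caracteres_vistos.add(caracter.lower())
--
--     return True
-- ===== SOURCE B (Python) =====
-- def es_heterograma(cadena):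
--     """
--     Verifica si la cadena es un heterograma, es decir, si no contiene caracteres repetidos.
--     """
--     letras = sorted(c.lower() for c in cadena if c.isalpha())
--     return all(x != y for x, y in zip(letras, letras[1:]))
-- ===== Notes on version B (the rewrite author's own statement) =====
-- stated objective: alternative
-- what changed: Replaces the incremental seen-set with early return by a sort-then-scan: sort the filtered lowercased letters and check that no two adjacent letters are equal (no set at all).
import Mathlib
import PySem

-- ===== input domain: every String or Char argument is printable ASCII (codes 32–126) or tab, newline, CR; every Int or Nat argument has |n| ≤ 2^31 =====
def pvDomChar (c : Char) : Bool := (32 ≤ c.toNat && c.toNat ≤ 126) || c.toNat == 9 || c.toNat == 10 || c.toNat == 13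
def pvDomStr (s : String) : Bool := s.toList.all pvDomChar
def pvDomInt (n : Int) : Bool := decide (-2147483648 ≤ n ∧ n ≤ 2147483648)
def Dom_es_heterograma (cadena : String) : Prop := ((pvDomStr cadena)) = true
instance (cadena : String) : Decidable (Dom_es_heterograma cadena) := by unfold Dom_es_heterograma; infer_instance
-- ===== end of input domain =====

-- B sorts the filtered lowercased letters and checks that no two adjacent letters are
-- equal, instead of A's incremental seen-set loop with early return (objective: alternative).

-- ===== PORT A =====
-- A's for-loop over the characters with the growing seen set and early return False
def esHetGo : List Char → PySem.Set Char → Bool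
  | [], _ => true
  | c :: cs, seen =>
    if PySem.Chars.isalpha c then
      if PySem.Set.contains seen (PySem.Chars.lowerChar c) then false
      else esHetGo cs (PySem.Set.add seen (PySem.Chars.lowerChar c))
    else esHetGo cs seen

def es_heterograma (cadena : String) : Bool :=
  esHetGo cadena.toList PySem.Set.empty

-- ===== PORT B =====
-- letras = sorted(c.lower() for c in cadena if c.isalpha());
-- all(x != y for x, y in zip(letras, letras[1:]))  — letras[1:] is letras.drop 1
def es_heterograma_alt (cadena : String) : Bool :=
  let letras := PySem.List.sorted
    ((cadena.toList.filter (fun c => PySem.Chars.isalpha c)).map PySem.Chars.lowerChar)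
    (fun x => x) false
  (letras.zip (letras.drop 1)).all (fun p => decide (p.1 ≠ p.2))

-- ===== PRECONDITION & SPEC =====
def Spec_es_heterograma (cadena : String) (out : Bool) : Prop := out = es_heterograma_alt cadena
instance (cadena : String) (out : Bool) : Decidable (Spec_es_heterograma cadena out) := by unfold Spec_es_heterograma; infer_instance

-- ===== CLAIM (what is proved, stated in full; the proofs are below) =====
def Claim_equal_es_heterograma : Prop := ∀ (cadena : String), Dom_es_heterograma cadena → Spec_es_heterograma cadena (es_heterograma cadena)

-- ===== LEMMAS AND PROOFS =====

-- the letters both programs look at: lowercased alphabetic characters, in order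
def pvLetras (cs : List Char) : List Char :=
  (cs.filter (fun c => PySem.Chars.isalpha c)).map PySem.Chars.lowerChar

-- A's loop succeeds iff the remaining letters avoid the seen set and are themselves distinct
theorem esHetGo_iff (cs : List Char) : ∀ (seen : PySem.Set Char),
    esHetGo cs seen = true ↔ ((∀ x ∈ pvLetras cs, x ∉ seen) ∧ (pvLetras cs).Nodup) := by
  induction cs with
  | nil => intro seen; simp [esHetGo, pvLetras]
  | cons c cs ih =>
    intro seen
    by_cases ha : PySem.Chars.isalpha c
    · by_cases hm : PySem.Chars.lowerChar c ∈ seen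
      · have hc : PySem.Set.contains seen (PySem.Chars.lowerChar c) = true :=
          (PySem.Set.contains_iff _ _).2 hm
        simp only [esHetGo, ha, if_true, hc, if_true, Bool.false_eq_true, false_iff]
        rintro ⟨h1, -⟩
        exact (h1 _ (by simp [pvLetras, ha])) hm
      · have hc : PySem.Set.contains seen (PySem.Chars.lowerChar c) = false := by
          rcases Bool.eq_false_or_eq_true (PySem.Set.contains seen (PySem.Chars.lowerChar c)) with h | h
          · exact absurd ((PySem.Set.contains_iff _ _).1 h) hm
          · exact h
        simp only [esHetGo, ha, if_true, hc, if_false, Bool.false_eq_true, ih]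
        simp only [pvLetras, List.filter_cons, ha, if_true, List.map_cons, List.nodup_cons,
          List.mem_cons, List.mem_map, List.mem_filter, PySem.Set.mem_add]
        constructor
        · rintro ⟨h1, h2⟩
          refine ⟨?_, ?_, h2⟩
          · rintro x (rfl | hx)
            · exact hm
            · intro hs; exact (h1 x hx) (Or.inl hs)
          · rintro ⟨y, hy, hly⟩; exact (h1 _ ⟨y, hy, hly⟩) (Or.inr rfl)
        · rintro ⟨h1, h2, h3⟩
          refine ⟨?_, h3⟩
          rintro x hx hs
          rcases hs with h | rfl
          · exact h1 x (Or.inr hx) h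
          · exact h2 hx
    · simp only [esHetGo]
      rw [if_neg ha, ih]
      simp [pvLetras, ha]

-- on a ≤-sorted list, 'no two adjacent elements equal' characterises distinctness
theorem adjAll_iff_nodup (l : List Char) (hp : l.Pairwise (· ≤ ·)) :
    ((l.zip (l.drop 1)).all (fun p => decide (p.1 ≠ p.2)) = true) ↔ l.Nodup := by
  induction l with
  | nil => simp
  | cons a l ih =>
    cases l with
    | nil => simp
    | cons b m =>
      have hp' : (b :: m).Pairwise (· ≤ ·) := hp.tail
      have hab : a ≤ b := (List.pairwise_cons.1 hp).1 b (List.mem_cons_self ..)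
      have ham : ∀ x ∈ m, a ≤ x := fun x hx =>
        (List.pairwise_cons.1 hp).1 x (List.mem_cons_of_mem _ hx)
      have hbm : ∀ x ∈ m, b ≤ x := (List.pairwise_cons.1 hp').1
      have ihm := ih hp'
      simp only [List.drop_succ_cons, List.drop_zero] at ihm
      simp only [List.drop_succ_cons, List.drop_zero, List.zip_cons_cons, List.all_cons,
        Bool.and_eq_true, decide_eq_true_eq, ihm, List.nodup_cons, List.mem_cons]
      constructor
      · rintro ⟨hne, hnb, hnodup⟩
        have hlt : a < b := lt_of_le_of_ne hab hne
        refine ⟨?_, hnb, hnodup⟩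
        rintro (rfl | hx)
        · exact absurd rfl hne
        · exact absurd (hbm a hx) (not_le.2 hlt)
      · rintro ⟨hna, hnb, hnodup⟩
        exact ⟨fun h => hna (Or.inl h), hnb, hnodup⟩

-- ===== VERDICT (by name: the statement is the Claim_ definition above) =====
theorem es_heterograma_spec : Claim_equal_es_heterograma := by
  intro cadena _
  unfold Spec_es_heterograma es_heterograma es_heterograma_alt
  rw [Bool.eq_iff_iff, esHetGo_iff]
  have hp : (PySem.List.sorted (pvLetras cadena.toList) (fun x => x) false).Pairwise (· ≤ ·) := by
    simpa using PySem.List.sorted_pairwise (pvLetras cadena.toList) (fun x => x)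
  have hperm : (PySem.List.sorted (pvLetras cadena.toList) (fun x => x) false).Perm
      (pvLetras cadena.toList) := PySem.List.sorted_perm _ _ _
  rw [show ((cadena.toList.filter (fun c => PySem.Chars.isalpha c)).map PySem.Chars.lowerChar)
      = pvLetras cadena.toList from rfl,
    adjAll_iff_nodup _ hp, hperm.nodup_iff]
  simp [PySem.Set.empty]
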